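-- pv_equiv track=rewrite | github.com/UltimatePea/wenyan-stdlib | coordinate_development.py | _determine_issue_status
-- ===== SOURCE A (Python) =====
-- from typing import Dict, List, Optional, Tuple
--
-- def _determine_issue_status(issue: Dict) -> str:
--     """Determine current status of an issue."""
--     labels = [label['name'] for label in issue.get('labels', [])]
--
--     if 'in-progress' in labels:
--         return "in_progress"
--     elif 'ready-for-development' in labels:
--         return "ready"
--     elif 'blocked' in labels:
--         return "blocked"
--     elif 'ready-for-review' in labels:
--         return "review"
--     else:
--         return "open"
-- ===== SOURCE B (Python) =====
-- _RANK = {'in-progress': 0, 'ready-for-development': 1, 'blocked': 2, 'ready-for-review': 3}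
-- _STATUS = ['in_progress', 'ready', 'blocked', 'review', 'open']
--
-- def _determine_issue_status(issue):
--     """Determine current status of an issue.
--
--     Single pass: reduce the labels to the minimum priority rank of any
--     recognized label (4 = unrecognized), then index the status table.
--     """
--     best = 4
--     for label in issue.get('labels', []):
--         r = _RANK.get(label['name'], 4)
--         if r < best:
--             best = r
--     return _STATUS[best]
-- ===== Notes on version B (the rewrite author's own statement) =====
-- stated objective: alternative
-- what changed: Replaces the four membership tests over a rebuilt label list with a single-pass min-reduction: each label name is mapped to a numeric priority rank and the minimum rank indexes a status table.
import Mathlib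
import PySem

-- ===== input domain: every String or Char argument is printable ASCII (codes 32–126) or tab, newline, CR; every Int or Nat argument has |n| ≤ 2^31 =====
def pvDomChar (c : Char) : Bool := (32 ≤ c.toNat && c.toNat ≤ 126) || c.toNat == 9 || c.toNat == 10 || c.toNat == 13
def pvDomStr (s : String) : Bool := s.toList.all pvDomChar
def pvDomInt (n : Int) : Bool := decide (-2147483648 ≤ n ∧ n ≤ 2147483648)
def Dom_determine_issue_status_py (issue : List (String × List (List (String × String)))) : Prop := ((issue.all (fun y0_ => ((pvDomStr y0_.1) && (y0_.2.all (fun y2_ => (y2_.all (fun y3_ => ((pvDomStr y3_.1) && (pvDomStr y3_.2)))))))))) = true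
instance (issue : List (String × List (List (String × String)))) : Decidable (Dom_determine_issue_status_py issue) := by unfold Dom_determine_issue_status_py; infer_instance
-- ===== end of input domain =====

-- B replaces A's four membership tests over the label list by a single-pass
-- min-rank reduction indexing a status table; a different decomposition, not faster.

-- ===== PORT A =====
-- label['name'] raises KeyError on a missing key; Pre_ excludes that, so the
-- `.getD ""` default is never reached on admitted inputs (exact under Pre_).
def determine_issue_status_py (issue : List (String × List (List (String × String)))) : String :=
  let labels : List String :=
    ((PySem.Dict.mk issue).getD "labels" []).map
      (fun l => ((PySem.Dict.mk l).get? "name").getD "")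
  if "in-progress" ∈ labels then "in_progress"
  else if "ready-for-development" ∈ labels then "ready"
  else if "blocked" ∈ labels then "blocked"
  else if "ready-for-review" ∈ labels then "review"
  else "open"

-- ===== PORT B =====
def pvRank : PySem.Dict String Int :=
  PySem.Dict.mk
    [("in-progress", 0), ("ready-for-development", 1), ("blocked", 2), ("ready-for-review", 3)]

def pvStatus : List String := ["in_progress", "ready", "blocked", "review", "open"]

-- the loop body: r = _RANK.get(name, 4); if r < best: best = r
def pvStep (best : Int) (n : String) : Int :=
  let r := pvRank.getD n 4
  if r < best then r else best

-- label['name'] raises KeyError on a missing key; Pre_ excludes that (same as A).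
-- _STATUS[best] with 0 ≤ best ≤ 4 is always in range, so pyGet?'s `.getD ""` never fires.
def determine_issue_status_py_alt (issue : List (String × List (List (String × String)))) : String :=
  let best : Int :=
    ((PySem.Dict.mk issue).getD "labels" []).foldl
      (fun best l => pvStep best (((PySem.Dict.mk l).get? "name").getD "")) 4
  (PySem.List.pyGet? pvStatus best).getD ""

-- ===== PRECONDITION & SPEC =====
-- Pre_ excludes issues whose 'labels' list contains a dict without a 'name'
-- key: there the Python A (and B) raises KeyError (returns no value).
def Pre_determine_issue_status_py (issue : List (String × List (List (String × String)))) : Prop :=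
  (((PySem.Dict.mk issue).getD "labels" []).all
    (fun l => (PySem.Dict.mk l).contains "name")) = true
instance (issue : List (String × List (List (String × String)))) : Decidable (Pre_determine_issue_status_py issue) := by unfold Pre_determine_issue_status_py; infer_instance

def pvWitness_determine_issue_status_py : (List (String × List (List (String × String)))) :=
  [("labels", [[("name", "blocked")], [("name", "misc")]])]

def Spec_determine_issue_status_py (issue : List (String × List (List (String × String)))) (out : String) : Prop := out = determine_issue_status_py_alt issue
instance (issue : List (String × List (List (String × String)))) (out : String) : Decidable (Spec_determine_issue_status_py issue out) := by unfold Spec_determine_issue_status_py; infer_instance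

-- ===== CLAIM (what is proved, stated in full; the proofs are below) =====
def Claim_equal_determine_issue_status_py : Prop := ∀ (issue : List (String × List (List (String × String)))), Dom_determine_issue_status_py issue → Pre_determine_issue_status_py issue → Spec_determine_issue_status_py issue (determine_issue_status_py issue)

-- ===== LEMMAS AND PROOFS =====
theorem pvRank_getD (n : String) : pvRank.getD n 4 =
    (if "in-progress" = n then 0 else if "ready-for-development" = n then 1
     else if "blocked" = n then 2 else if "ready-for-review" = n then 3 else 4) := by
  simp only [pvRank, PySem.Dict.getD_eq_get?_getD, PySem.Dict.get?_mk_cons, beq_iff_eq]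
  split_ifs <;> simp [PySem.Dict.get?]

theorem pvStep_eq (b : Int) (n : String) : pvStep b n =
    (if "in-progress" = n then min b 0 else if "ready-for-development" = n then min b 1
     else if "blocked" = n then min b 2 else if "ready-for-review" = n then min b 3 else min b 4) := by
  simp only [pvStep, pvRank_getD]
  split_ifs <;> omega

-- the min-rank fold equals the first-match membership chain (accumulator ≤ 4)
set_option maxHeartbeats 1000000 in
theorem pvFold_min_rank (ns : List String) (b : Int) (hb : b ≤ 4) :
    ns.foldl pvStep b =
      (if "in-progress" ∈ ns then min b 0
       else if "ready-for-development" ∈ ns then min b 1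
       else if "blocked" ∈ ns then min b 2
       else if "ready-for-review" ∈ ns then min b 3
       else b) := by
  induction ns generalizing b with
  | nil => simp
  | cons n t ih =>
      have h' : pvStep b n ≤ 4 := by rw [pvStep_eq]; split_ifs <;> omega
      rw [List.foldl_cons, ih _ h', pvStep_eq]
      simp only [List.mem_cons]
      split_ifs <;> first | omega | tauto

theorem pvFold_dicts (ls : List (List (String × String))) (b : Int) :
    ls.foldl (fun best l => pvStep best (((PySem.Dict.mk l).get? "name").getD "")) b
    = (ls.map (fun l => ((PySem.Dict.mk l).get? "name").getD "")).foldl pvStep b := by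
  rw [List.foldl_map]

-- ===== VERDICT (by name: the statement is the Claim_ definition above) =====
theorem determine_issue_status_py_spec : Claim_equal_determine_issue_status_py := by
  intro issue _ _
  unfold Spec_determine_issue_status_py determine_issue_status_py determine_issue_status_py_alt
  simp only [pvFold_dicts]
  rw [pvFold_min_rank _ _ (by omega)]
  split_ifs <;> rfl
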